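-- pv_equiv track=rewrite | github.com/bfbbdecomp/bfbb | tools/symbol_ripper/main.py | cpp_get_qualified
-- ===== SOURCE A (Python) =====
-- def cpp_get_qualified(text):
-- 	if text.startswith("Q"):
-- 		# multiple qualified name
-- 		count = int(text[1])
-- 		text = text[2:]
-- 		namespaces = []
-- 		for _ in range(count):
-- 			length = int(text[0])
-- 			if text[1].isnumeric():
-- 				length = length * 10 + int(text[1])
-- 				namespaces.append(text[2:(length + 2)])
-- 				text = text[(length + 2):]
-- 			else:
-- 				namespaces.append(text[1:(length + 1)])
-- 				text = text[(length + 1):]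
-- 		return text, namespaces
-- 	elif text[0].isnumeric():
-- 		# single qualified name
-- 		length = int(text[0])
-- 		if text[1].isnumeric():
-- 			length = length * 10 + int(text[1])
-- 			return text[(length + 2):], [text[2:(length + 2)]]
-- 		else:
-- 			return text[(length + 1):], [text[1:(length + 1)]]
-- 	else:
-- 		# not qualified name
-- 		return text, []
-- ===== SOURCE B (Python) =====
-- def cpp_get_qualified(text):
-- 	if text[:1] == "Q":
-- 		count, base = int(text[1]), 2
-- 	elif text[:1].isnumeric():
-- 		count, base = 1, 0
-- 	else:
-- 		return text, []
--
-- 	def spans(i, k):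
-- 		# recursively compute absolute (start, end) index spans of the k names
-- 		if k == 0:
-- 			return i, []
-- 		d = 2 if text[i + 1:i + 2].isnumeric() else 1
-- 		j = i + d + int(text[i:i + d])
-- 		end, rest = spans(j, k - 1)
-- 		return end, [(i + d, j)] + rest
--
-- 	end, sp = spans(base, count)
-- 	return text[end:], [text[a:b] for a, b in sp]
-- ===== Notes on version B (the rewrite author's own statement) =====
-- stated objective: alternative
-- what changed: B replaces A's imperative loop that repeatedly re-slices and reassigns the shrinking text with a recursive helper that computes absolute (start,end) index spans over the untouched original string, then materialises all name slices and the remainder in one final step.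
import Mathlib
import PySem

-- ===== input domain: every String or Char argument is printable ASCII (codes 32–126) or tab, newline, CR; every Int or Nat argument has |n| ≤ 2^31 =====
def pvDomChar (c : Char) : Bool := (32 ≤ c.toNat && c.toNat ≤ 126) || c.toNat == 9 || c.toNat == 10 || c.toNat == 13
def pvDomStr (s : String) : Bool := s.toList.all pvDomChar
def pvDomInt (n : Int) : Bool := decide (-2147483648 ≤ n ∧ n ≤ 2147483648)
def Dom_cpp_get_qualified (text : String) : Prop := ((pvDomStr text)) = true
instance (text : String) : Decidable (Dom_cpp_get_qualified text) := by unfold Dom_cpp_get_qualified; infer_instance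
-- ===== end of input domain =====

-- B replaces A's loop that repeatedly re-slices the shrinking text with a recursive helper
-- computing absolute (start,end) spans over the untouched original string, slicing at the end
-- (objective: alternative); equal return values on Pre_ (inputs where A does not raise).

-- ===== PORT A =====
-- A's 'for _ in range(count)' loop: state (text, namespaces); none = the iteration raised
-- (IndexError on text[0]/text[1], ValueError from int). '.isnumeric()' on the one-character
-- string text[1] is ported as PySem.Chars.isdigit (exact on the printable-ASCII domain).
def qloopA : Nat → List Char → List (List Char) → Option (List Char × List (List Char))
  | 0, t, ns => some (t, ns)
  | n + 1, t, ns =>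
    match PySem.List.pyGet? t 0 with
    | none => none
    | some c0 =>
      match PySem.Int.ofChars? [c0] with
      | none => none
      | some length =>
        match PySem.List.pyGet? t 1 with
        | none => none
        | some c1 =>
          if PySem.Chars.isdigit c1 then
            match PySem.Int.ofChars? [c1] with
            | none => none
            | some d1 =>
              qloopA n (PySem.List.slice t (some (length * 10 + d1 + 2)) none)
                (ns ++ [PySem.List.slice t (some 2) (some (length * 10 + d1 + 2))])
          else
            qloopA n (PySem.List.slice t (some (length + 1)) none)
              (ns ++ [PySem.List.slice t (some 1) (some (length + 1))])

def cpp_get_qualified (text : String) : String × List String :=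
  let s := text.toList
  if PySem.Chars.startswith s ['Q'] then
    -- multiple qualified name
    match PySem.List.pyGet? s 1 with
    | none => (text, [])            -- IndexError (excluded by Pre_)
    | some c1 =>
      match PySem.Int.ofChars? [c1] with
      | none => (text, [])          -- ValueError (excluded by Pre_)
      | some count =>
        match qloopA count.toNat (PySem.List.slice s (some 2) none) [] with
        | none => (text, [])        -- the loop raised (excluded by Pre_)
        | some (t, ns) => (String.ofList t, ns.map String.ofList)
  else
    match PySem.List.pyGet? s 0 with
    | none => (text, [])            -- IndexError on text[0] (excluded by Pre_)
    | some c0 =>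
      if PySem.Chars.isdigit c0 then
        -- single qualified name
        match PySem.Int.ofChars? [c0] with
        | none => (text, [])
        | some length =>
          match PySem.List.pyGet? s 1 with
          | none => (text, [])      -- IndexError on text[1] (excluded by Pre_)
          | some c1 =>
            if PySem.Chars.isdigit c1 then
              match PySem.Int.ofChars? [c1] with
              | none => (text, [])
              | some d1 =>
                (String.ofList (PySem.List.slice s (some (length * 10 + d1 + 2)) none),
                  [String.ofList (PySem.List.slice s (some 2) (some (length * 10 + d1 + 2)))])
            else
              (String.ofList (PySem.List.slice s (some (length + 1)) none),
                [String.ofList (PySem.List.slice s (some 1) (some (length + 1)))])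
      else
        -- not qualified name
        (text, [])

-- ===== PORT B =====
-- B's recursive helper 'spans(i, k)': computes the absolute (start, end) index spans of the
-- k names over the ORIGINAL string, never mutating text; none = int(...) raised (ValueError).
def bspans (s : List Char) : Int → Nat → Option (Int × List (Int × Int))
  | i, 0 => some (i, [])
  | i, k + 1 =>
    let d : Int :=
      if PySem.Chars.strIsdigit (PySem.List.slice s (some (i + 1)) (some (i + 2))) then 2 else 1
    match PySem.Int.ofChars? (PySem.List.slice s (some i) (some (i + d))) with
    | none => none
    | some v =>
      match bspans s (i + d + v) k with
      | none => none
      | some (e, rest) => some (e, (i + d, i + d + v) :: rest)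

-- B's final step: 'return text[end:], [text[a:b] for a, b in sp]'
def bfinish (text : String) (s : List Char) : Option (Int × List (Int × Int)) → String × List String
  | none => (text, [])              -- spans raised (excluded by Pre_)
  | some (e, sp) =>
    (String.ofList (PySem.List.slice s (some e) none),
      sp.map (fun p => String.ofList (PySem.List.slice s (some p.1) (some p.2))))

def cpp_get_qualified_alt (text : String) : String × List String :=
  let s := text.toList
  if PySem.List.slice s none (some 1) = ['Q'] then
    match PySem.List.pyGet? s 1 with
    | none => (text, [])            -- IndexError in int(text[1]) (excluded by Pre_)
    | some c1 =>
      match PySem.Int.ofChars? [c1] with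
      | none => (text, [])          -- ValueError (excluded by Pre_)
      | some count => bfinish text s (bspans s 2 count.toNat)
  else if PySem.Chars.strIsdigit (PySem.List.slice s none (some 1)) then
    bfinish text s (bspans s 0 1)
  else
    (text, [])

-- ===== PRECONDITION & SPEC =====
-- Pre_ excludes exactly the inputs on which A raises: IndexError on text[0]/text[1] (empty
-- string, 'Q' alone, a length field with no name character after it) or ValueError from
-- int(text[1]) after 'Q'. Grammar check: n segments, each '<digit>c…' (2 chars minimum),
-- advancing by the 1-or-2-digit length.
def validSegs : Nat → List Char → Bool
  | 0, _ => true
  | n + 1, s =>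
    match s with
    | c0 :: c1 :: rest =>
      PySem.Chars.isdigit c0 &&
        (if PySem.Chars.isdigit c1 then
          validSegs n (rest.drop ((c0.toNat - 48) * 10 + (c1.toNat - 48)))
        else
          validSegs n ((c1 :: rest).drop (c0.toNat - 48)))
    | _ => false

def preB : List Char → Bool
  | [] => false
  | c :: rest =>
    if c = 'Q' then
      match rest with
      | [] => false
      | c1 :: rest2 => PySem.Chars.isdigit c1 && validSegs (c1.toNat - 48) rest2
    else if PySem.Chars.isdigit c then validSegs 1 (c :: rest)
    else true

def Pre_cpp_get_qualified (text : String) : Prop := preB text.toList = true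
instance (text : String) : Decidable (Pre_cpp_get_qualified text) := by
  unfold Pre_cpp_get_qualified; infer_instance

def pvWitness_cpp_get_qualified : String := "Q21a2bc"

def Spec_cpp_get_qualified (text : String) (out : String × List String) : Prop :=
  out = cpp_get_qualified_alt text
instance (text : String) (out : String × List String) : Decidable (Spec_cpp_get_qualified text out) := by
  unfold Spec_cpp_get_qualified; infer_instance

-- ===== CLAIM (what is proved, stated in full; the proofs are below) =====
def Claim_equal_cpp_get_qualified : Prop :=
  ∀ (text : String), Dom_cpp_get_qualified text → Pre_cpp_get_qualified text →
    Spec_cpp_get_qualified text (cpp_get_qualified text)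

-- ===== LEMMAS AND PROOFS =====

theorem digit_cases (c : Char) (h : PySem.Chars.isdigit c = true) :
    c ∈ ['0', '1', '2', '3', '4', '5', '6', '7', '8', '9'] := by
  simp [PySem.Chars.isdigit, Char.le_def, UInt32.le_iff_toNat_le] at h
  obtain ⟨h1, h2⟩ := h
  have hlo : 48 ≤ c.toNat := h1
  have hhi : c.toNat ≤ 57 := h2
  have hofn := Char.ofNat_toNat c
  interval_cases hn : c.toNat <;> (rw [← hofn]; decide)

theorem ofChars_one (c : Char) (h : PySem.Chars.isdigit c = true) :
    PySem.Int.ofChars? [c] = some ((c.toNat - 48 : Nat) : Int) := by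
  have hm := digit_cases c h
  fin_cases hm <;> decide

theorem ofChars_two (c d : Char) (hc : PySem.Chars.isdigit c = true)
    (hd : PySem.Chars.isdigit d = true) :
    PySem.Int.ofChars? [c, d] =
      some (((c.toNat - 48) * 10 + (d.toNat - 48) : Nat) : Int) := by
  have hmc := digit_cases c hc
  have hmd := digit_cases d hd
  fin_cases hmc <;> fin_cases hmd <;> decide

theorem strIsdigit_one (c : Char) : PySem.Chars.strIsdigit [c] = PySem.Chars.isdigit c := by
  simp [PySem.Chars.strIsdigit]

theorem pyGet_zero {α : Type} (a b : α) (l : List α) :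
    PySem.List.pyGet? (a :: b :: l) 0 = some a := by
  have h : (0 : Int) ≤ (l.length : Int) + 1 := by positivity
  simp [PySem.List.pyGet?, PySem.List.pyIdx?, h]

theorem pyGet_one {α : Type} (a b : α) (l : List α) :
    PySem.List.pyGet? (a :: b :: l) 1 = some b := by
  simp [PySem.List.pyGet?, PySem.List.pyIdx?]

theorem startswith_Q_cons (c : Char) (l : List Char) :
    PySem.Chars.startswith (c :: l) ['Q'] = (c = 'Q' : Bool) := by
  by_cases h : c = 'Q'
  · simp [PySem.Chars.startswith_iff, List.cons_prefix_cons, h]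
  · simp only [h, decide_false]
    rw [← Bool.not_eq_true, PySem.Chars.startswith_iff]
    simp [List.cons_prefix_cons]
    intro hc
    exact h hc.symm

-- drop one / two more elements of a drop that is a cons
theorem drop_succ_of_drop_cons {α : Type} (s : List α) (i : Nat) (c : α) (l : List α)
    (h : s.drop i = c :: l) : s.drop (i + 1) = l := by
  have := congrArg List.tail h
  simpa [List.tail_drop] using this

-- the central invariant: B's span computation at absolute index i mirrors one run of A's
-- loop on the suffix s.drop i, for any accumulated namespaces ns
theorem spans_eq (s : List Char) (n : Nat) : ∀ (i : Nat) (ns : List (List Char)),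
    validSegs n (s.drop i) = true →
    ∃ (j : Nat) (sp : List (Int × Int)),
      bspans s ((i : Nat) : Int) n = some (((j : Nat) : Int), sp) ∧
      qloopA n (s.drop i) ns =
        some (s.drop j, ns ++ sp.map (fun p => PySem.List.slice s (some p.1) (some p.2))) := by
  induction n with
  | zero =>
    intro i ns _
    exact ⟨i, [], rfl, by simp [qloopA]⟩
  | succ n ih =>
    intro i ns h
    match hdrop : s.drop i with
    | [] => rw [hdrop] at h; simp [validSegs] at h
    | [c0] => rw [hdrop] at h; simp [validSegs] at h
    | c0 :: c1 :: rest =>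
      rw [hdrop, validSegs] at h
      simp only [Bool.and_eq_true] at h
      obtain ⟨hd0, hrest⟩ := h
      have h1 : s.drop (i + 1) = c1 :: rest := drop_succ_of_drop_cons s i c0 _ hdrop
      have h2 : s.drop (i + 2) = rest := by
        have := drop_succ_of_drop_cons s (i + 1) c1 rest h1
        simpa [Nat.add_assoc] using this
      -- the 1-or-2-digit test B makes on s[i+1:i+2] is A's test on text[1]
      have hc1slice : PySem.List.slice s (some ((i : Int) + 1)) (some ((i : Int) + 2)) = [c1] := by
        rw [show ((i : Int) + 1) = (((i + 1 : Nat) : Int)) from by push_cast; ring,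
          show ((i : Int) + 2) = (((i + 2 : Nat) : Int)) from by push_cast; ring,
          PySem.List.slice_natCast, h1]
        simp
      rw [qloopA]
      simp only [pyGet_zero, pyGet_one, ofChars_one c0 hd0]
      by_cases hd1 : PySem.Chars.isdigit c1 = true
      · -- two-digit length
        rw [if_pos hd1] at hrest
        set N : Nat := (c0.toNat - 48) * 10 + (c1.toNat - 48) with hN
        have hslice2 : PySem.List.slice s (some ((i : Int))) (some ((i : Int) + 2)) = [c0, c1] := by
          rw [show ((i : Int) + 2) = (((i + 2 : Nat) : Int)) from by push_cast; ring,
            PySem.List.slice_natCast, hdrop]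
          simp
        have hseg : s.drop (i + 2 + N) = rest.drop N := by
          rw [← List.drop_drop, h2]
        obtain ⟨j, sp, hb, hq⟩ := ih (i + 2 + N) (ns ++
          [PySem.List.slice (c0 :: c1 :: rest) (some 2)
            (some (((c0.toNat - 48 : Nat) : Int) * 10 + ((c1.toNat - 48 : Nat) : Int) + 2))])
          (by rw [hseg]; exact hrest)
        refine ⟨j, (((i + 2 : Nat) : Int), ((i + 2 + N : Nat) : Int)) :: sp, ?_, ?_⟩
        · rw [show ((i : Nat) : Int) = (i : Int) from rfl, bspans]
          simp only [hc1slice, strIsdigit_one, hd1, if_true, hslice2, ofChars_two c0 c1 hd0 hd1]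
          rw [show ((i : Int) + 2 + ((N : Nat) : Int)) = (((i + 2 + N : Nat) : Int)) from by
            push_cast; ring] at *
          rw [hb]
          refine congrArg some ?_
          refine Prod.ext rfl ?_
          simp only
          refine congrArg₂ List.cons ?_ rfl
          refine Prod.ext ?_ rfl
          simp only
          push_cast; ring
        · simp only [hd1, if_true, ofChars_one c1 hd1]
          rw [show (((c0.toNat - 48 : Nat) : Int) * 10 + ((c1.toNat - 48 : Nat) : Int) + 2)
              = ((N + 2 : Nat) : Int) from by rw [hN]; push_cast; ring]
          have hadv : PySem.List.slice (c0 :: c1 :: rest) (some ((N + 2 : Nat) : Int)) none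
              = s.drop (i + 2 + N) := by
            rw [PySem.List.slice_from_natCast, hseg, show N + 2 = N + 1 + 1 from rfl,
              List.drop_succ_cons, List.drop_succ_cons]
          have happ : PySem.List.slice (c0 :: c1 :: rest) (some (2 : Int))
                (some ((N + 2 : Nat) : Int))
              = PySem.List.slice s (some ((i + 2 : Nat) : Int)) (some ((i + 2 + N : Nat) : Int)) := by
            rw [show (2 : Int) = ((2 : Nat) : Int) from rfl, PySem.List.slice_natCast,
              PySem.List.slice_natCast, h2]
            simp [show i + 2 + N - (i + 2) = N from by omega, show N + 2 - 2 = N from by omega]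
          rw [show (((c0.toNat - 48 : Nat) : Int) * 10 + ((c1.toNat - 48 : Nat) : Int) + 2)
              = ((N + 2 : Nat) : Int) from by rw [hN]; push_cast; ring] at *
          rw [happ] at hq
          rw [hadv, happ, hq]
          simp
      · -- one-digit length
        rw [if_neg hd1] at hrest
        set N : Nat := c0.toNat - 48 with hN
        have hslice1 : PySem.List.slice s (some ((i : Int))) (some ((i : Int) + 1)) = [c0] := by
          rw [show ((i : Int) + 1) = (((i + 1 : Nat) : Int)) from by push_cast; ring,
            PySem.List.slice_natCast, hdrop]
          simp
        have hseg : s.drop (i + 1 + N) = (c1 :: rest).drop N := by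
          rw [← List.drop_drop, h1]
        obtain ⟨j, sp, hb, hq⟩ := ih (i + 1 + N) (ns ++
          [PySem.List.slice (c0 :: c1 :: rest) (some 1)
            (some (((c0.toNat - 48 : Nat) : Int) + 1))])
          (by rw [hseg]; exact hrest)
        refine ⟨j, (((i + 1 : Nat) : Int), ((i + 1 + N : Nat) : Int)) :: sp, ?_, ?_⟩
        · rw [show ((i : Nat) : Int) = (i : Int) from rfl, bspans]
          simp only [hc1slice, strIsdigit_one, hd1, if_false, Bool.false_eq_true, hslice1,
            ofChars_one c0 hd0]
          rw [show ((i : Int) + 1 + ((N : Nat) : Int)) = (((i + 1 + N : Nat) : Int)) from by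
            push_cast; ring] at *
          rw [hb]
          refine congrArg some ?_
          refine Prod.ext rfl ?_
          simp only
          refine congrArg₂ List.cons ?_ rfl
          refine Prod.ext ?_ rfl
          simp only
          push_cast; ring
        · simp only [hd1, if_false, Bool.false_eq_true]
          rw [show (((c0.toNat - 48 : Nat) : Int) + 1) = ((N + 1 : Nat) : Int) from by
            rw [hN]; push_cast; ring]
          have hadv : PySem.List.slice (c0 :: c1 :: rest) (some ((N + 1 : Nat) : Int)) none
              = s.drop (i + 1 + N) := by
            rw [PySem.List.slice_from_natCast, hseg, List.drop_succ_cons]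
          have happ : PySem.List.slice (c0 :: c1 :: rest) (some (1 : Int))
                (some ((N + 1 : Nat) : Int))
              = PySem.List.slice s (some ((i + 1 : Nat) : Int)) (some ((i + 1 + N : Nat) : Int)) := by
            rw [show (1 : Int) = ((1 : Nat) : Int) from rfl, PySem.List.slice_natCast,
              PySem.List.slice_natCast, h1]
            simp [show i + 1 + N - (i + 1) = N from by omega, show N + 1 - 1 = N from by omega]
          rw [show (((c0.toNat - 48 : Nat) : Int) + 1) = ((N + 1 : Nat) : Int) from by
            rw [hN]; push_cast; ring] at *
          rw [happ] at hq
          rw [hadv, happ, hq]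
          simp

-- ===== VERDICT (by name: the statement is the Claim_ definition above) =====
theorem cpp_get_qualified_spec : Claim_equal_cpp_get_qualified := by
  intro text _ hpre
  unfold Pre_cpp_get_qualified at hpre
  unfold Spec_cpp_get_qualified
  show cpp_get_qualified text = cpp_get_qualified_alt text
  unfold cpp_get_qualified cpp_get_qualified_alt
  match hs : text.toList with
  | [] => rw [hs] at hpre; simp [preB] at hpre
  | c :: rest =>
    rw [hs] at hpre
    have htake1 : PySem.List.slice (c :: rest) none (some (1 : Int)) = [c] := by
      rw [show (1 : Int) = ((1 : Nat) : Int) from rfl, PySem.List.slice_to_natCast]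
      simp
    by_cases hq : c = 'Q'
    · subst hq
      simp only [startswith_Q_cons, decide_true, if_true, htake1]
      match rest with
      | [] => simp [preB] at hpre
      | c1 :: rest2 =>
        simp only [preB] at hpre
        rw [if_pos trivial, Bool.and_eq_true] at hpre
        obtain ⟨hd1, hsegs⟩ := hpre
        simp only [pyGet_one, ofChars_one c1 hd1, Int.toNat_natCast]
        have hdropQ : ('Q' :: c1 :: rest2).drop 2 = rest2 := by simp
        have hsegs' : validSegs (c1.toNat - 48) (List.drop 2 ('Q' :: c1 :: rest2)) = true := by
          rw [hdropQ]; exact hsegs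
        obtain ⟨j, sp, hb, hq2⟩ := spans_eq ('Q' :: c1 :: rest2) (c1.toNat - 48) 2 [] hsegs'
        have hslice2 : PySem.List.slice ('Q' :: c1 :: rest2) (some (2 : Int)) none = rest2 := by
          rw [show (2 : Int) = ((2 : Nat) : Int) from rfl, PySem.List.slice_from_natCast]
          exact hdropQ
        rw [hdropQ] at hq2
        rw [hslice2, hq2]
        have hb2 : bspans ('Q' :: c1 :: rest2) 2 (c1.toNat - 48) = some (((j : Nat) : Int), sp) := hb
        rw [hb2]
        simp [bfinish, PySem.List.slice_from_natCast]
    · simp only [preB, if_neg hq] at hpre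
      simp only [startswith_Q_cons, hq, decide_false, Bool.false_eq_true, if_false, htake1,
        strIsdigit_one]
      have hne : ¬ ([c] = ['Q']) := by simpa using hq
      rw [if_neg hne]
      by_cases hd0 : PySem.Chars.isdigit c = true
      · rw [if_pos hd0] at hpre
        -- A's inline single-name branch equals one unfolding of qloopA on the whole string
        have hA : (match PySem.List.pyGet? (c :: rest) 0 with
            | none => (text, ([] : List String))
            | some c0 =>
              if PySem.Chars.isdigit c0 then
                match PySem.Int.ofChars? [c0] with
                | none => (text, [])
                | some length =>
                  match PySem.List.pyGet? (c :: rest) 1 with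
                  | none => (text, [])
                  | some c1 =>
                    if PySem.Chars.isdigit c1 then
                      match PySem.Int.ofChars? [c1] with
                      | none => (text, [])
                      | some d1 =>
                        (String.ofList (PySem.List.slice (c :: rest) (some (length * 10 + d1 + 2)) none),
                          [String.ofList (PySem.List.slice (c :: rest) (some 2) (some (length * 10 + d1 + 2)))])
                    else
                      (String.ofList (PySem.List.slice (c :: rest) (some (length + 1)) none),
                        [String.ofList (PySem.List.slice (c :: rest) (some 1) (some (length + 1)))])
              else (text, []))
            = (match qloopA 1 (c :: rest) [] with
              | none => (text, [])
              | some (t, ns) => (String.ofList t, ns.map String.ofList)) := by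
          match rest with
          | [] => simp [validSegs] at hpre
          | c1 :: rest2 =>
            rw [show (1 : Nat) = 0 + 1 from rfl, qloopA]
            simp only [pyGet_zero, pyGet_one, ofChars_one c hd0, if_pos hd0]
            by_cases hd1 : PySem.Chars.isdigit c1 = true
            · simp only [hd1, if_true, ofChars_one c1 hd1, qloopA]
              simp
            · simp only [hd1, if_false, Bool.false_eq_true, qloopA]
              simp
        rw [hA, if_pos hd0]
        obtain ⟨j, sp, hb, hq2⟩ := spans_eq (c :: rest) 1 0 [] (by simpa using hpre)
        simp only [List.drop_zero] at hq2
        rw [hq2]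
        have hb2 : bspans (c :: rest) 0 1 = some (((j : Nat) : Int), sp) := hb
        rw [hb2]
        simp [bfinish, PySem.List.slice_from_natCast]
      · have e0 : PySem.List.pyGet? (c :: rest) 0 = some c := by
          have h : (0 : Int) ≤ (rest.length : Int) := by positivity
          simp [PySem.List.pyGet?, PySem.List.pyIdx?, h]
        simp only [e0, hd0, if_false, Bool.false_eq_true]
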